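-- pv_equiv track=rewrite | github.com/romeorizzi/portafoglioVoti_public | Algoritmi/2020-07-14/all-CMS-submissions-2020-07-14/20200714T104808.VR447268_id713ast.risparmio.py | operazione_2
-- ===== SOURCE A (Python) =====
-- def operazione_2(vec, l, r):
--
--     tmp_matrix, line_counter = [[] for _ in range(len(vec))], 0
--
--     for i in range(l,r+1):
--         if(vec[i]==1):
--             tmp_matrix[line_counter].append(vec[i])
--         if(vec[i]==0):
--             line_counter += 1
--
--     return len(list(filter(lambda a: a != [], tmp_matrix)))
-- ===== SOURCE B (Python) =====
-- def operazione_2(vec, l, r):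
--     count, has_one = 0, False
--     for i in range(l, r + 1):
--         if vec[i] == 1:
--             if not has_one:
--                 count += 1
--             has_one = True
--         elif vec[i] == 0:
--             has_one = False
--     return count
-- ===== Notes on version B (the rewrite author's own statement) =====
-- stated objective: simpler
-- what changed: Replaces the per-index bucket matrix plus the final filter/len step with a single pass that keeps only a running counter and an inside-a-group flag (no O(len(vec)) allocation).
-- outside the precondition, e.g. on operazione_2([1], -1, 0): A returns 1, B returns 1
import Mathlib
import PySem

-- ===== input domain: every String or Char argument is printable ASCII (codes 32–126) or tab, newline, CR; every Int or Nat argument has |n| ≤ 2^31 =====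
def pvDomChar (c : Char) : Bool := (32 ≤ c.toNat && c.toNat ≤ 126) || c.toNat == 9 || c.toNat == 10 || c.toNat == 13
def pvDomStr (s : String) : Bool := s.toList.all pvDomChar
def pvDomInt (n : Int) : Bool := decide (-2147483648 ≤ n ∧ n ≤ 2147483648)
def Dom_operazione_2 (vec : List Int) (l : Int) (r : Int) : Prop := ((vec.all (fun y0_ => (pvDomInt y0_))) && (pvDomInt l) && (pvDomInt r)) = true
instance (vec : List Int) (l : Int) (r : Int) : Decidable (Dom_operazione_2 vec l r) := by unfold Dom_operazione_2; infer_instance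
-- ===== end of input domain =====

-- B replaces A's per-index bucket matrix and final filter/len with a single pass keeping a counter and a flag (simpler, O(1) extra space).


-- ===== PORT A =====
-- loop body of A: if vec[i]==1 append to bucket line_counter; if vec[i]==0 increment line_counter
def stepA (vec : List Int) (st : List (List Int) × Int) (i : Int) : List (List Int) × Int :=
  let v := PySem.List.pyGetD vec i 0
  let st1 := if v == 1 then (st.1.modify st.2.toNat (fun b => b ++ [v]), st.2) else st
  if v == 0 then (st1.1, st1.2 + 1) else st1

def operazione_2 (vec : List Int) (l : Int) (r : Int) : Int :=
  let tmp_matrix : List (List Int) := (List.range vec.length).map (fun _ => ([] : List Int))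
  let res := (PySem.List.pyRange l (r + 1) 1).foldl (stepA vec) (tmp_matrix, 0)
  ((res.1.filter (fun a => a != [])).length : Int)

-- ===== PORT B =====
-- loop body of B: count a new group when a 1 is seen with the flag down; a 0 resets the flag
def stepB (vec : List Int) (st : Int × Bool) (i : Int) : Int × Bool :=
  let v := PySem.List.pyGetD vec i 0
  if v == 1 then (if st.2 then st else (st.1 + 1, true))
  else if v == 0 then (st.1, false)
  else st

def operazione_2_alt (vec : List Int) (l : Int) (r : Int) : Int :=
  ((PySem.List.pyRange l (r + 1) 1).foldl (stepB vec) (0, false)).1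

-- ===== PRECONDITION & SPEC =====
-- Pre_ excludes inputs where A raises IndexError (a scanned index out of range, or the internal
-- bucket index overflowing len(vec)); the conservative bound r - l < len(vec) used for the latter
-- also excludes some negative-index wraparound scans on which A happens to return (see cites).
def Pre_operazione_2 (vec : List Int) (l : Int) (r : Int) : Prop :=
  r < l ∨ (-(vec.length : Int) ≤ l ∧ r < (vec.length : Int) ∧ r - l < (vec.length : Int))
instance (vec : List Int) (l : Int) (r : Int) : Decidable (Pre_operazione_2 vec l r) := by unfold Pre_operazione_2; infer_instance
def pvWitness_operazione_2 : List Int × Int × Int := ([1, 0, 1, 2, 1], 0, 4)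

def Spec_operazione_2 (vec : List Int) (l : Int) (r : Int) (out : Int) : Prop := out = operazione_2_alt vec l r
instance (vec : List Int) (l : Int) (r : Int) (out : Int) : Decidable (Spec_operazione_2 vec l r out) := by unfold Spec_operazione_2; infer_instance

-- ===== CLAIM (what is proved, stated in full; the proofs are below) =====
def Claim_equal_operazione_2 : Prop := ∀ (vec : List Int) (l : Int) (r : Int), Dom_operazione_2 vec l r → Pre_operazione_2 vec l r → Spec_operazione_2 vec l r (operazione_2 vec l r)

-- ===== LEMMAS AND PROOFS =====

lemma countP_modify (p : List Int → Bool) (f : List Int → List Int) :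
    ∀ (m : List (List Int)) (k : Nat), k < m.length →
    (m.modify k f).countP p + (if p (m.getD k []) then 1 else 0)
      = m.countP p + (if p (f (m.getD k [])) then 1 else 0) := by
  intro m
  induction m with
  | nil => intro k hk; simp at hk
  | cons a t ih =>
    intro k hk
    cases k with
    | zero => simp [List.countP_cons, List.getD]; split_ifs <;> omega
    | succ k =>
      have hk' : k < t.length := by simpa using hk
      have := ih k hk'
      simp [List.countP_cons, List.getD] at this ⊢
      split_ifs at this ⊢ <;> omega

lemma getD_modify_self (f : List Int → List Int) (m : List (List Int)) (k : Nat)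
    (hk : k < m.length) : (m.modify k f).getD k [] = f (m.getD k []) := by
  simp [List.getD, hk]

lemma getD_modify_ne (f : List Int → List Int) (m : List (List Int)) (k j : Nat)
    (h : k ≠ j) : (m.modify k f).getD j [] = m.getD j [] := by
  simp [List.getD, h]

lemma key (vec : List Int) :
    ∀ (is : List Int) (m : List (List Int)) (lc cnt : Int) (flag : Bool),
    0 ≤ lc → lc.toNat + is.length ≤ m.length →
    (∀ j : Nat, lc.toNat < j → m.getD j [] = []) →
    (flag = true ↔ m.getD lc.toNat [] ≠ []) →
    cnt = (m.countP (fun a => a != []) : Int) →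
    (((is.foldl (stepA vec) (m, lc)).1.countP (fun a => a != []) : Nat) : Int)
      = (is.foldl (stepB vec) (cnt, flag)).1 := by
  intro is
  induction is with
  | nil => intro m lc cnt flag _ _ _ _ hcnt; simpa using hcnt.symm
  | cons i rest ih =>
    intro m lc cnt flag hlc hlen hzero hflag hcnt
    have hlt : lc.toNat < m.length := by simp at hlen; omega
    simp only [List.foldl_cons]
    by_cases h1 : PySem.List.pyGetD vec i 0 = 1
    · -- a 1: A appends at bucket lc, B raises the flag / counts a new group
      have hA : stepA vec (m, lc) i = (m.modify lc.toNat (fun b => b ++ [1]), lc) := by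
        simp [stepA, h1]
      have hne : (m.modify lc.toNat (fun b => b ++ [1])).getD lc.toNat [] ≠ [] := by
        rw [getD_modify_self _ _ _ hlt]; simp
      have hzero' : ∀ j : Nat, lc.toNat < j →
          (m.modify lc.toNat (fun b => b ++ [1])).getD j [] = [] := by
        intro j hj; rw [getD_modify_ne _ _ _ _ (by omega)]; exact hzero j hj
      have hcm := countP_modify (fun a => a != []) (fun b => b ++ [1]) m lc.toNat hlt
      simp only [bne_iff_ne, ne_eq] at hcm
      have h2 : ¬ (m.getD lc.toNat [] ++ [1] = []) := by simp
      rw [if_pos h2] at hcm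
      cases hfl : flag with
      | true =>
        have hB : stepB vec (cnt, true) i = (cnt, true) := by simp [stepB, h1]
        rw [hA, hB]
        apply ih _ _ _ _ hlc (by rw [List.length_modify]; simp at hlen ⊢; omega) hzero'
          (by simpa using hne)
        rw [if_pos (hflag.mp hfl)] at hcm
        rw [hcnt]; omega
      | false =>
        have hB : stepB vec (cnt, false) i = (cnt + 1, true) := by simp [stepB, h1]
        rw [hA, hB]
        apply ih _ _ _ _ hlc (by rw [List.length_modify]; simp at hlen ⊢; omega) hzero'
          (by simpa using hne)
        have hgd : m.getD lc.toNat [] = [] := by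
          by_contra hc; simp [hflag.mpr hc] at hfl
        rw [if_neg (not_not_intro hgd)] at hcm
        rw [hcnt]; omega
    · by_cases h0 : PySem.List.pyGetD vec i 0 = 0
      · -- a 0: A moves to the next bucket, B lowers the flag
        have hA : stepA vec (m, lc) i = (m, lc + 1) := by simp [stepA, h0]
        have hB : stepB vec (cnt, flag) i = (cnt, false) := by simp [stepB, h0]
        rw [hA, hB]
        have hlc1 : (lc + 1).toNat = lc.toNat + 1 := by omega
        apply ih _ _ _ _ (by omega) (by simp at hlen ⊢; omega)
          (fun j hj => hzero j (by omega))
          (by rw [hlc1, hzero (lc.toNat + 1) (by omega)]; simp) hcnt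
      · -- any other value: both states unchanged
        have hA : stepA vec (m, lc) i = (m, lc) := by simp [stepA, h1, h0]
        have hB : stepB vec (cnt, flag) i = (cnt, flag) := by simp [stepB, h1, h0]
        rw [hA, hB]
        exact ih _ _ _ _ hlc (by simp at hlen ⊢; omega) hzero hflag hcnt

lemma init_getD (n j : Nat) : (List.replicate n ([] : List Int)).getD j [] = [] := by
  rcases Nat.lt_or_ge j n with h | h
  · simp [List.getD, h]
  · have hle : (List.replicate n ([] : List Int)).length ≤ j := by simpa using h
    simp [List.getD, List.getElem?_eq_none hle]

lemma init_countP (n : Nat) :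
    (List.replicate n ([] : List Int)).countP (fun a => a != []) = 0 := by
  rw [List.countP_eq_zero]
  intro a ha
  simp [List.eq_of_mem_replicate ha]

-- ===== VERDICT (by name: the statement is the Claim_ definition above) =====
theorem operazione_2_spec : Claim_equal_operazione_2 := by
  intro vec l r _ hpre
  unfold Spec_operazione_2 operazione_2 operazione_2_alt
  simp only [← List.countP_eq_length_filter, List.map_const', List.length_range]
  apply key vec _ _ 0 0 false le_rfl
  · rw [PySem.List.length_pyRange_one, List.length_replicate]
    rcases hpre with h | ⟨_, _, h⟩ <;> omega
  · intro j _; exact init_getD _ _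
  · rw [init_getD]; simp
  · rw [init_countP]; simp
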